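-- pv_equiv track=rewrite | github.com/PoroGramr/Algorithm | 프로그래머스/1/42840. 모의고사/모의고사.py | solution
-- ===== SOURCE A (Python) =====
-- def solution(answers):
--     supo =[
--         [1, 2, 3, 4, 5],
--         [2, 1, 2, 3, 2, 4, 2, 5],
--         [3, 3, 1, 1, 2, 2, 4, 4, 5 ,5]
--     ]
--
--     # 각 수포자별 정답 갯수 저장 리스트
--     correct = [0, 0, 0]
--
--     for idx, ans in enumerate(answers):
--         # idx 문제 번호, ans 정답
--         for i in range(3):
--             if ans == supo[i][idx % len(supo[i])]:
--                 correct[i] += 1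
--
--     MAX = max(correct) # 가장 많이 맞춘 정답 수
--
--     answer = []
--
--     for idx, cor in enumerate(correct):
--         if cor == MAX:
--             answer.append(idx+1)
--     return answer
-- ===== SOURCE B (Python) =====
-- def solution(answers):
--     patterns = [
--         [1, 2, 3, 4, 5],
--         [2, 1, 2, 3, 2, 4, 2, 5],
--         [3, 3, 1, 1, 2, 2, 4, 4, 5, 5],
--     ]
--     # All three pattern lengths divide 40, so a guess at question idx depends
--     # only on idx % 40.  Bucket the answers once into a histogram keyed by
--     # (idx % 40, answer); each score is then 40 lookups, never rescanning answers.
--     hist = {}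
--     for idx, ans in enumerate(answers):
--         key = (idx % 40, ans)
--         hist[key] = hist.get(key, 0) + 1
--     scores = [sum(hist.get((r, p[r % len(p)]), 0) for r in range(40))
--               for p in patterns]
--     best = max(scores)
--     return [i + 1 for i, s in enumerate(scores) if s == best]
-- ===== Notes on version B (the rewrite author's own statement) =====
-- stated objective: alternative
-- what changed: Replaces A's per-question comparison against all three patterns (nested loop, three mutable counters, idx % len indexing) by a bucketing algorithm: since all pattern lengths divide 40, one pass builds a dict histogram keyed by (idx % 40, answer), and each pattern's score is then obtained by 40 dictionary lookups without rescanning the answers; winners are selected by a comprehension; the per-element work drops from three pattern comparisons to one dict update.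
import Mathlib
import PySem

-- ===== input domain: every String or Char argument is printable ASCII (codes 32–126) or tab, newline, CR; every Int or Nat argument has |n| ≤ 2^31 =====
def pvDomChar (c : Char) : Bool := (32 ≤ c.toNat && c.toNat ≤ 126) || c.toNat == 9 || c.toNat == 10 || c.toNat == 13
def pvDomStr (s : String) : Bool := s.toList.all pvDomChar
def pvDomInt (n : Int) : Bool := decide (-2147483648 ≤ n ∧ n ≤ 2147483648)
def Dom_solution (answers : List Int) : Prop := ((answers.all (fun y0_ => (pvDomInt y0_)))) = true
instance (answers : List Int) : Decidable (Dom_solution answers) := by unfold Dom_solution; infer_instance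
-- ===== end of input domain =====

-- B replaces A's per-question three-pattern comparison loop by a residue-class histogram
-- (all pattern lengths divide 40), scored by 40 dict lookups per pattern (objective: alternative).

-- ===== PORT A =====
-- A's fixed guess patterns
def supoA : List (List Int) := [[1, 2, 3, 4, 5], [2, 1, 2, 3, 2, 4, 2, 5], [3, 3, 1, 1, 2, 2, 4, 4, 5, 5]]

-- the body of A's outer for-loop: for i in range(3): if ans == supo[i][idx % len(supo[i])]: correct[i] += 1
-- (indices i and idx % len are always in range on the literal patterns, so pyGetD/pySetD are exact)
def stepA (correct : List Int) (p : Int × Int) : List Int :=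
  (PySem.List.pyRange 0 3 1).foldl
    (fun c i =>
      if p.2 == PySem.List.pyGetD (PySem.List.pyGetD supoA i [])
          (PySem.Int.mod p.1 ((PySem.List.pyGetD supoA i []).length : Int)) 0
      then PySem.List.pySetD c i (PySem.List.pyGetD c i 0 + 1) else c)
    correct

def solution (answers : List Int) : List Int :=
  let correct := (PySem.List.enumerate answers).foldl stepA [0, 0, 0]
  -- max(correct): correct always has exactly 3 elements, so Python's max never raises
  let MAX := (PySem.List.max? correct (fun x => x)).getD 0
  (PySem.List.enumerate correct).foldl
    (fun answer q => if q.2 == MAX then answer ++ [q.1 + 1] else answer) []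

-- ===== PORT B =====
def solution_alt (answers : List Int) : List Int :=
  let patterns : List (List Int) := [[1, 2, 3, 4, 5], [2, 1, 2, 3, 2, 4, 2, 5], [3, 3, 1, 1, 2, 2, 4, 4, 5, 5]]
  -- one pass: histogram keyed by (idx % 40, answer)
  let hist := (PySem.List.enumerate answers).foldl
      (fun d q => d.insert (PySem.Int.mod q.1 40, q.2) (d.getD (PySem.Int.mod q.1 40, q.2) 0 + 1))
      (PySem.Dict.empty : PySem.Dict (Int × Int) Int)
  -- each score: 40 lookups, one per residue class
  let scores := patterns.map (fun p =>
    ((PySem.List.pyRange 0 40 1).map (fun r =>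
      hist.getD (r, PySem.List.pyGetD p (PySem.Int.mod r ((p.length : Nat) : Int)) 0) 0)).sum)
  -- max(scores): scores always has exactly 3 elements, so Python's max never raises
  let best := (PySem.List.max? scores (fun v => v)).getD 0
  (PySem.List.enumerate scores).filterMap (fun q => if q.2 == best then some (q.1 + 1) else none)

-- ===== PRECONDITION & SPEC =====
def Spec_solution (answers : List Int) (out : List Int) : Prop := out = solution_alt answers
instance (answers : List Int) (out : List Int) : Decidable (Spec_solution answers out) := by unfold Spec_solution; infer_instance

-- ===== CLAIM (what is proved, stated in full; the proofs are below) =====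
def Claim_equal_solution : Prop := ∀ (answers : List Int), Dom_solution answers → Spec_solution answers (solution answers)

-- ===== LEMMAS AND PROOFS =====

-- number of matches of pattern p against l, question numbers starting at s
def cnt (p : List Int) : Nat → List Int → Int
  | _, [] => 0
  | s, a :: r =>
    (if a == PySem.List.pyGetD p ((s % p.length : Nat) : Int) 0 then 1 else 0) + cnt p (s + 1) r

lemma pyRange03 : PySem.List.pyRange 0 3 1 = ([0, 1, 2] : List Int) := by decide

lemma stepA_eval (a b c : Int) (k : Nat) (x : Int) :
    stepA [a, b, c] ((k : Int), x) =
      [a + (if x == PySem.List.pyGetD [1, 2, 3, 4, 5] ((k % 5 : Nat) : Int) 0 then 1 else 0),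
       b + (if x == PySem.List.pyGetD [2, 1, 2, 3, 2, 4, 2, 5] ((k % 8 : Nat) : Int) 0 then 1 else 0),
       c + (if x == PySem.List.pyGetD [3, 3, 1, 1, 2, 2, 4, 4, 5, 5] ((k % 10 : Nat) : Int) 0 then 1 else 0)] := by
  have g0 : PySem.List.pyGetD supoA 0 [] = [1, 2, 3, 4, 5] := by decide
  have g1 : PySem.List.pyGetD supoA 1 [] = [2, 1, 2, 3, 2, 4, 2, 5] := by decide
  have g2 : PySem.List.pyGetD supoA 2 [] = [3, 3, 1, 1, 2, 2, 4, 4, 5, 5] := by decide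
  have l0 : ((([1, 2, 3, 4, 5] : List Int).length : Int)) = 5 := by norm_num
  have l1 : ((([2, 1, 2, 3, 2, 4, 2, 5] : List Int).length : Int)) = 8 := by norm_num
  have l2 : ((([3, 3, 1, 1, 2, 2, 4, 4, 5, 5] : List Int).length : Int)) = 10 := by norm_num
  have h5 : PySem.Int.mod (k : Int) (5 : Int) = ((k % 5 : Nat) : Int) := by
    rw [PySem.Int.mod_eq_emod_of_pos (by norm_num)]; omega
  have h8 : PySem.Int.mod (k : Int) (8 : Int) = ((k % 8 : Nat) : Int) := by
    rw [PySem.Int.mod_eq_emod_of_pos (by norm_num)]; omega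
  have h10 : PySem.Int.mod (k : Int) (10 : Int) = ((k % 10 : Nat) : Int) := by
    rw [PySem.Int.mod_eq_emod_of_pos (by norm_num)]; omega
  have t2 : Int.toNat 2 = 2 := rfl
  rw [stepA, pyRange03]
  simp only [List.foldl]
  rw [g0, g1, g2, l0, l1, l2, h5, h8, h10]
  rcases Bool.eq_false_or_eq_true (x == PySem.List.pyGetD [1, 2, 3, 4, 5] ((k % 5 : Nat) : Int) 0) with h0 | h0 <;>
  rcases Bool.eq_false_or_eq_true (x == PySem.List.pyGetD [2, 1, 2, 3, 2, 4, 2, 5] ((k % 8 : Nat) : Int) 0) with h1 | h1 <;>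
  rcases Bool.eq_false_or_eq_true (x == PySem.List.pyGetD [3, 3, 1, 1, 2, 2, 4, 4, 5, 5] ((k % 10 : Nat) : Int) 0) with h2 | h2 <;>
  simp only [h0, h1, h2, Bool.false_eq_true, if_true, if_false] <;>
  norm_num [PySem.List.pySetD, PySem.List.pySet?, PySem.List.pyGetD, PySem.List.pyGet?,
    PySem.List.pyIdx?, t2]

lemma enum_fold_eq_cnt (l : List Int) : ∀ (k : Nat) (a b c : Int),
    (PySem.List.enumerate l (k : Int)).foldl stepA [a, b, c] =
      [a + cnt [1, 2, 3, 4, 5] k l,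
       b + cnt [2, 1, 2, 3, 2, 4, 2, 5] k l,
       c + cnt [3, 3, 1, 1, 2, 2, 4, 4, 5, 5] k l] := by
  induction l with
  | nil => intro k a b c; simp [PySem.List.enumerate_nil, cnt]
  | cons x r ih =>
    intro k a b c
    rw [PySem.List.enumerate_cons, List.foldl_cons, stepA_eval]
    have : ((k : Int) + 1) = ((k + 1 : Nat) : Int) := by push_cast; ring
    rw [this, ih]
    simp [cnt]
    refine ⟨by ring, by ring, by ring⟩

-- sum of the indicator [(r, key r) = e] over a list r ∉'s which misses e.1 is 0
lemma sum_ind_not_mem (key : Int → Int) (e : Int × Int) :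
    ∀ (R : List Int), e.1 ∉ R →
      (R.map (fun r => if (r, key r) == e then (1 : Int) else 0)).sum = 0 := by
  intro R
  induction R with
  | nil => intro _; simp
  | cons r R ih =>
    intro h
    have hr : r ≠ e.1 := fun hre => h (by simp [hre])
    have hbeq : ((r, key r) == e) = false := by
      rw [beq_eq_false_iff_ne]; intro hc; exact hr (congrArg Prod.fst hc)
    simp only [List.map_cons, List.sum_cons, hbeq, Bool.false_eq_true, if_false, zero_add]
    exact ih (fun hm => h (List.mem_cons_of_mem _ hm))

-- over a Nodup list containing e.1 the same sum is the match indicator of e against key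
lemma sum_ind_mem (key : Int → Int) (e : Int × Int) :
    ∀ (R : List Int), R.Nodup → e.1 ∈ R →
      (R.map (fun r => if (r, key r) == e then (1 : Int) else 0)).sum
        = if e.2 == key e.1 then 1 else 0 := by
  intro R
  induction R with
  | nil => intro _ h; simp at h
  | cons r R ih =>
    intro hnd hm
    rcases List.nodup_cons.mp hnd with ⟨hrR, hndR⟩
    by_cases hre : r = e.1
    · subst hre
      have h0 : (R.map (fun r => if (r, key r) == e then (1 : Int) else 0)).sum = 0 :=
        sum_ind_not_mem key e R hrR
      simp only [List.map_cons, List.sum_cons, h0, add_zero]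
      cases e with
      | mk ρ a =>
        simp only [beq_iff_eq, Prod.ext_iff, true_and]
        by_cases ha : a = key ρ
        · simp [ha]
        · rw [if_neg (fun h : key ρ = a => ha h.symm), if_neg ha]
    · have hmR : e.1 ∈ R := by
        rcases List.mem_cons.mp hm with h | h
        · exact absurd h.symm hre
        · exact h
      have hbeq : ((r, key r) == e) = false := by
        rw [beq_eq_false_iff_ne]; intro hc; exact hre (congrArg Prod.fst hc)
      simp only [List.map_cons, List.sum_cons, hbeq, Bool.false_eq_true, if_false, zero_add]
      exact ih hndR hmR

-- the 40 per-residue counts of L sum to the per-element match count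
lemma sum_counts (key : Int → Int) :
    ∀ (L : List (Int × Int)), (∀ e ∈ L, e.1 ∈ PySem.List.pyRange 0 40 1) →
      ((PySem.List.pyRange 0 40 1).map (fun r => ((L.count (r, key r) : Nat) : Int))).sum
        = (L.map (fun e => if e.2 == key e.1 then (1 : Int) else 0)).sum := by
  intro L
  induction L with
  | nil => intro _; simp
  | cons e L ih =>
    intro h
    have hmem : e.1 ∈ PySem.List.pyRange 0 40 1 := h e (List.mem_cons_self)
    have hrec := ih (fun x hx => h x (List.mem_cons_of_mem _ hx))
    have hcount : ∀ r : Int, (((e :: L).count (r, key r) : Nat) : Int)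
        = ((L.count (r, key r) : Nat) : Int) + (if (r, key r) == e then (1 : Int) else 0) := by
      intro r
      rw [List.count_cons]
      by_cases hc : ((r, key r) == e) = true
      · have : (e == (r, key r)) = true := by
          rw [beq_iff_eq] at hc ⊢; exact hc.symm
        simp [this, hc]
      · have hc' : ((r, key r) == e) = false := by simpa using hc
        have : (e == (r, key r)) = false := by
          rw [beq_eq_false_iff_ne] at hc' ⊢; exact fun h => hc' h.symm
        simp [this, hc']
    calc ((PySem.List.pyRange 0 40 1).map (fun r => (((e :: L).count (r, key r) : Nat) : Int))).sum
        = ((PySem.List.pyRange 0 40 1).map (fun r =>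
            ((L.count (r, key r) : Nat) : Int) + (if (r, key r) == e then (1 : Int) else 0))).sum := by
          congr 1; exact List.map_congr_left (fun r _ => hcount r)
      _ = ((PySem.List.pyRange 0 40 1).map (fun r => ((L.count (r, key r) : Nat) : Int))).sum
            + ((PySem.List.pyRange 0 40 1).map (fun r => if (r, key r) == e then (1 : Int) else 0)).sum :=
          PySem.List.sum_map_add_int _ _ _
      _ = (L.map (fun x => if x.2 == key x.1 then (1 : Int) else 0)).sum
            + (if e.2 == key e.1 then (1 : Int) else 0) := by
          rw [hrec, sum_ind_mem key e _ (PySem.List.nodup_pyRange_one 0 40) hmem]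
      _ = ((e :: L).map (fun x => if x.2 == key x.1 then (1 : Int) else 0)).sum := by
          simp only [List.map_cons, List.sum_cons]; ring

-- the per-element match sum over enumerate, keyed through idx % 40, is cnt (len p divides 40)
lemma match_sum_eq_cnt (p : List Int) (hp : 0 < p.length) (hdvd : p.length ∣ 40) :
    ∀ (l : List Int) (k : Nat),
      ((PySem.List.enumerate l (k : Int)).map (fun q =>
          if q.2 == PySem.List.pyGetD p
              (PySem.Int.mod (PySem.Int.mod q.1 40) ((p.length : Nat) : Int)) 0
          then (1 : Int) else 0)).sum = cnt p k l := by
  intro l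
  induction l with
  | nil => intro k; simp [PySem.List.enumerate_nil, cnt]
  | cons a r ih =>
    intro k
    rw [PySem.List.enumerate_cons, List.map_cons, List.sum_cons]
    have hmods : PySem.Int.mod (PySem.Int.mod (k : Int) 40) ((p.length : Nat) : Int)
        = ((k % p.length : Nat) : Int) := by
      rw [PySem.Int.mod_eq_emod_of_pos (show (0:Int) < 40 by norm_num),
          PySem.Int.mod_eq_emod_of_pos (by exact_mod_cast hp)]
      rw [Int.emod_emod_of_dvd _ (by exact_mod_cast hdvd)]
      exact_mod_cast (Int.natCast_mod k p.length).symm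
    have hk1 : ((k : Int) + 1) = ((k + 1 : Nat) : Int) := by push_cast; ring
    rw [hmods, hk1, ih]
    simp [cnt]

lemma max3_getD (x y z : Int) :
    (PySem.List.max? [x, y, z] (fun v => v)).getD 0 = max (max x y) z := by
  rw [PySem.List.max?_id_cons]
  simp [List.foldl]

-- B's score for one pattern equals cnt p 0
lemma score_eq_cnt (p : List Int) (hp : 0 < p.length) (hdvd : p.length ∣ 40) (answers : List Int) :
    ((PySem.List.pyRange 0 40 1).map (fun r =>
        (PySem.Dict.counter ((PySem.List.enumerate answers).map
            (fun q => (PySem.Int.mod q.1 40, q.2)))).getD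
          (r, PySem.List.pyGetD p (PySem.Int.mod r ((p.length : Nat) : Int)) 0) 0)).sum
      = cnt p 0 answers := by
  set key : Int → Int := fun r => PySem.List.pyGetD p (PySem.Int.mod r ((p.length : Nat) : Int)) 0 with hkey
  set L := (PySem.List.enumerate answers).map (fun q => (PySem.Int.mod q.1 40, q.2)) with hL
  have hgetd : ∀ r : Int, (PySem.Dict.counter L).getD (r, key r) 0 = ((L.count (r, key r) : Nat) : Int) :=
    fun r => PySem.Dict.getD_counter L (r, key r)
  have hbounds : ∀ e ∈ L, e.1 ∈ PySem.List.pyRange 0 40 1 := by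
    intro e he
    rcases List.mem_map.mp he with ⟨q, _, rfl⟩
    rw [PySem.List.mem_pyRange_one]
    exact ⟨PySem.Int.mod_nonneg _ (by norm_num), PySem.Int.mod_lt _ (by norm_num)⟩
  calc ((PySem.List.pyRange 0 40 1).map (fun r => (PySem.Dict.counter L).getD (r, key r) 0)).sum
      = ((PySem.List.pyRange 0 40 1).map (fun r => ((L.count (r, key r) : Nat) : Int))).sum := by
        congr 1; exact List.map_congr_left (fun r _ => hgetd r)
    _ = (L.map (fun e => if e.2 == key e.1 then (1 : Int) else 0)).sum := sum_counts key L hbounds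
    _ = cnt p 0 answers := by
        rw [hL, List.map_map]
        exact match_sum_eq_cnt p hp hdvd answers 0

-- ===== VERDICT (by name: the statement is the Claim_ definition above) =====
theorem solution_spec : Claim_equal_solution := by
  intro answers _
  unfold Spec_solution solution solution_alt
  have hA := enum_fold_eq_cnt answers 0 0 0 0
  norm_num at hA
  dsimp only
  rw [hA]
  have hhist : (PySem.List.enumerate answers).foldl
      (fun d q => d.insert (PySem.Int.mod q.1 40, q.2) (d.getD (PySem.Int.mod q.1 40, q.2) 0 + 1))
      (PySem.Dict.empty : PySem.Dict (Int × Int) Int)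
    = PySem.Dict.counter ((PySem.List.enumerate answers).map
        (fun q => (PySem.Int.mod q.1 40, q.2))) := by
    rw [← PySem.Dict.foldl_insert_getD_add_one_eq_counter, List.foldl_map]
  simp only [hhist]
  simp only [List.map_cons, List.map_nil]
  simp only [score_eq_cnt [1, 2, 3, 4, 5] (by norm_num) (by norm_num) answers,
      score_eq_cnt [2, 1, 2, 3, 2, 4, 2, 5] (by norm_num) (by norm_num) answers,
      score_eq_cnt [3, 3, 1, 1, 2, 2, 4, 4, 5, 5] (by norm_num) (by norm_num) answers]
  set c0 := cnt [1, 2, 3, 4, 5] 0 answers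
  set c1 := cnt [2, 1, 2, 3, 2, 4, 2, 5] 0 answers
  set c2 := cnt [3, 3, 1, 1, 2, 2, 4, 4, 5, 5] 0 answers
  rw [max3_getD]
  simp [PySem.List.enumerate_cons, PySem.List.enumerate_nil, List.foldl, List.filterMap]
  split_ifs <;> simp
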